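-- pv_equiv track=rewrite | github.com/Hackin7/Programming-Crappy-Solutions | School Exercises/2. NYJC A Level Computing 2019-2020/Practicals/Practical7.py | findNearNumbers
-- ===== SOURCE A (Python) =====
-- def findNearNumbers(text, char):
--     number = text[char]
--     stop = False
--     char += 1 #Move to next character
--     while char < len(text) and not stop:
--         if text[char] == " ":
--             char += 1
--         elif (not text[char].isdigit()): #end of number
--             stop = True
--             char -= 1
--         elif text[char].isdigit():
--             number += text[char] #Add to number
--             char += 1
--     return number,char
-- ===== SOURCE B (Python) =====
-- def findNearNumbers(text, char):
--     n = len(text)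
--     # pass 1: find where the run of spaces/digits after `char` ends
--     i = char + 1
--     while i < n and (text[i] == " " or text[i].isdigit()):
--         i += 1
--     # pass 2: rebuild the number from the scanned region, dropping spaces
--     number = text[char] + "".join(text[j] for j in range(char + 1, i) if text[j] != " ")
--     return number, (i if i >= n else i - 1)
-- ===== Notes on version B (the rewrite author's own statement) =====
-- stated objective: alternative
-- what changed: Replaces A's single stateful while-loop (stop flag, mutating index and accumulating string in step) with two passes: a scan that only advances an index to the end of the space/digit run, then a comprehension that rebuilds the number from that region; the final index is computed by one conditional instead of the stop-flag decrement.
import Mathlib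
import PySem

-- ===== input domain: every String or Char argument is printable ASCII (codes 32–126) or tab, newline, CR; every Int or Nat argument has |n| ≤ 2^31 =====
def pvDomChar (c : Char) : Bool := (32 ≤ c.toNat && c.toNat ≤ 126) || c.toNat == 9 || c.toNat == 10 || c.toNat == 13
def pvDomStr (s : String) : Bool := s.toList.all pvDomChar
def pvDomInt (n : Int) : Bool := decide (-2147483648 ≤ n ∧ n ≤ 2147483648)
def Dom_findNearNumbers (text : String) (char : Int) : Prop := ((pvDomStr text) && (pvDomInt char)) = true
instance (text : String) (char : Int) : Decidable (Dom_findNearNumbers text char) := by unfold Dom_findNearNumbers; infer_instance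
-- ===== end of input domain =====

-- B replaces A's single stateful while-loop (stop flag, in-step accumulation) with a scan pass that
-- only finds the end of the space/digit run plus a comprehension rebuilding the number; alternative, same cost.


-- ===== PORT A =====
-- the while loop of A: state (number, stop, char); `none` from pyGet? (IndexError) is unreachable under Pre_
def findNearNumbersGo (tl : List Char) (number : List Char) (stop : Bool) (char : Int) : List Char × Int :=
  if h : char < (tl.length : Int) ∧ stop = false then
    match PySem.List.pyGet? tl char with
    | none => (number, char)      -- IndexError: unreachable for an in-range starting index
    | some c =>
      if c = ' ' then findNearNumbersGo tl number stop (char + 1)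
      else if ¬ (PySem.Chars.isdigit c) then findNearNumbersGo tl number true (char - 1)
      else findNearNumbersGo tl (number ++ [c]) stop (char + 1)
  else (number, char)
termination_by (if stop then 0 else ((tl.length : Int) - char).toNat + 1)
decreasing_by
  · simp [h.2]; omega
  · simp [h.2]
  · simp [h.2]; omega

def findNearNumbers (text : String) (char : Int) : String × Int :=
  let tl := text.toList
  match PySem.List.pyGet? tl char with
  | none => ("", char)            -- IndexError: excluded by Pre_
  | some c0 =>
    let r := findNearNumbersGo tl [c0] false (char + 1)
    (String.mk r.1, r.2)

-- ===== PORT B =====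
-- pass 1 of B: advance i while text[i] is a space or a digit
def findNearNumbersScan (tl : List Char) (i : Int) : Int :=
  if h : i < (tl.length : Int) then
    match PySem.List.pyGet? tl i with
    | none => i                    -- IndexError: unreachable for an in-range starting index
    | some c => if c = ' ' ∨ PySem.Chars.isdigit c then findNearNumbersScan tl (i + 1) else i
  else i
termination_by ((tl.length : Int) - i).toNat
decreasing_by omega

def findNearNumbers_alt (text : String) (char : Int) : String × Int :=
  let tl := text.toList
  let n : Int := tl.length
  let i := findNearNumbersScan tl (char + 1)
  match PySem.List.pyGet? tl char with
  | none => ("", char)            -- IndexError: excluded by Pre_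
  | some c0 =>
    let body := (PySem.List.pyRange (char + 1) i 1).filterMap
      (fun j => match PySem.List.pyGet? tl j with
        | none => none
        | some c => if c ≠ ' ' then some c else none)
    (String.mk (c0 :: body), if i ≥ n then i else i - 1)

-- ===== PRECONDITION & SPEC =====
-- Pre_: exactly the inputs on which A returns (text[char] must not raise IndexError): -len ≤ char < len
def Pre_findNearNumbers (text : String) (char : Int) : Prop :=
  PySem.Raise.InRange text.toList.length char
instance (text : String) (char : Int) : Decidable (Pre_findNearNumbers text char) := by
  unfold Pre_findNearNumbers; infer_instance
def pvWitness_findNearNumbers : String × Int := ("x 12 3a", 0)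

def Spec_findNearNumbers (text : String) (char : Int) (out : String × Int) : Prop := out = findNearNumbers_alt text char
instance (text : String) (char : Int) (out : String × Int) : Decidable (Spec_findNearNumbers text char out) := by unfold Spec_findNearNumbers; infer_instance

-- ===== CLAIM (what is proved, stated in full; the proofs are below) =====
def Claim_equal_findNearNumbers : Prop := ∀ (text : String) (char : Int), Dom_findNearNumbers text char → Pre_findNearNumbers text char → Spec_findNearNumbers text char (findNearNumbers text char)

-- ===== LEMMAS AND PROOFS =====


-- the loop exits immediately once stop is set
theorem findNearNumbersGo_stop (tl : List Char) (number : List Char) (char : Int) :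
    findNearNumbersGo tl number true char = (number, char) := by
  rw [findNearNumbersGo]; simp

-- the scan pointer never moves backwards
theorem findNearNumbersScan_ge (tl : List Char) (i : Int) : i ≤ findNearNumbersScan tl i := by
  induction i using findNearNumbersScan.induct tl with
  | _ => rw [findNearNumbersScan]; split_ifs <;> simp_all <;> try omega

-- both sides when the pointer is already past the end
theorem findNearNumbersGo_eq_base (tl : List Char) (char : Int) (number : List Char)
    (hge : (tl.length : Int) ≤ char) :
    findNearNumbersGo tl number false char =
      (number ++ (PySem.List.pyRange char (findNearNumbersScan tl char) 1).filterMap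
          (fun j => match PySem.List.pyGet? tl j with
            | none => none
            | some c => if c ≠ ' ' then some c else none),
       if findNearNumbersScan tl char ≥ (tl.length : Int) then findNearNumbersScan tl char
       else findNearNumbersScan tl char - 1) := by
  have hs : findNearNumbersScan tl char = char := by
    rw [findNearNumbersScan]; simp; omega
  rw [findNearNumbersGo, hs, PySem.List.pyRange_one_eq_nil (le_refl char),
    if_pos (show char ≥ (tl.length : Int) from hge)]
  simp [show ¬ char < (tl.length : Int) by omega]

-- A's running loop equals B's scan + rebuild, for any in-range starting pointer
theorem findNearNumbersGo_eq (tl : List Char) :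
    ∀ (k : Nat) (char : Int) (number : List Char),
      -(tl.length : Int) ≤ char → ((tl.length : Int) - char).toNat ≤ k →
      findNearNumbersGo tl number false char =
        (number ++ (PySem.List.pyRange char (findNearNumbersScan tl char) 1).filterMap
            (fun j => match PySem.List.pyGet? tl j with
              | none => none
              | some c => if c ≠ ' ' then some c else none),
         if findNearNumbersScan tl char ≥ (tl.length : Int) then findNearNumbersScan tl char
         else findNearNumbersScan tl char - 1) := by
  intro k
  induction k with
  | zero =>
    intro char number hlo hk
    exact findNearNumbersGo_eq_base tl char number (by omega)
  | succ k ih =>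
    intro char number hlo hk
    by_cases hlt : char < (tl.length : Int)
    case neg => exact findNearNumbersGo_eq_base tl char number (by omega)
    · cases hg : PySem.List.pyGet? tl char with
      | none =>
        exfalso
        rw [PySem.List.pyGet?_eq_none_iff] at hg
        exact hg (by simp [PySem.Raise.InRange]; omega)
      | some c =>
        by_cases hsp : c = ' '
        · have hs : findNearNumbersScan tl char = findNearNumbersScan tl (char + 1) := by
            rw [findNearNumbersScan]; simp [hlt, hg, hsp]
          have hgeS := findNearNumbersScan_ge tl (char + 1)
          rw [findNearNumbersGo]
          simp only [hlt, and_true, dif_pos, hg, hsp, if_pos]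
          rw [ih (char + 1) number (by omega) (by omega), hs,
            PySem.List.pyRange_one_cons (by omega : char < findNearNumbersScan tl (char + 1))]
          simp [hg, hsp]
        · by_cases hd : PySem.Chars.isdigit c
          · have hs : findNearNumbersScan tl char = findNearNumbersScan tl (char + 1) := by
              rw [findNearNumbersScan]; simp [hlt, hg, hd]
            have hgeS := findNearNumbersScan_ge tl (char + 1)
            rw [findNearNumbersGo]
            simp only [hlt, and_true, dif_pos, hg, hsp, hd, not_true, if_false]
            rw [ih (char + 1) (number ++ [c]) (by omega) (by omega), hs,
              PySem.List.pyRange_one_cons (by omega : char < findNearNumbersScan tl (char + 1))]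
            simp [hg, hsp]
          · have hs : findNearNumbersScan tl char = char := by
              rw [findNearNumbersScan]; simp [hlt, hg, hsp, hd]
            rw [findNearNumbersGo]
            simp only [hlt, and_true, dif_pos, hg]
            rw [if_neg hsp, if_pos (by simp [hd]), findNearNumbersGo_stop, hs]
            simp [PySem.List.pyRange_one_eq_nil (le_refl char)]
            omega

-- ===== VERDICT (by name: the statement is the Claim_ definition above) =====
theorem findNearNumbers_spec : Claim_equal_findNearNumbers := by
  intro text char hdom hpre
  unfold Spec_findNearNumbers findNearNumbers findNearNumbers_alt
  unfold Pre_findNearNumbers at hpre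
  have hR : -(text.toList.length : Int) ≤ char ∧ char < (text.toList.length : Int) := by
    simpa [PySem.Raise.InRange] using hpre
  cases hg : PySem.List.pyGet? text.toList char with
  | none =>
    exfalso
    rw [PySem.List.pyGet?_eq_none_iff] at hg
    exact hg hpre
  | some c0 =>
    simp only [hg]
    rw [findNearNumbersGo_eq text.toList (((text.toList.length : Int) - (char + 1)).toNat)
      (char + 1) [c0] (by omega) (by omega)]
    simp
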